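-- pv_equiv track=rewrite | github.com/Katherinaxxx/leetcode | 快手-跳格子.py | solution
-- ===== SOURCE A (Python) =====
-- def solution(n, s, l):
--     if n <= 2:
--         return 0
--     if n == 3:
--         return (1 + 3) * (s[0] + s[2])
--
--     score = 0
--     for i in range(n - 2):
--         j = i
--         while j + 2 <= n - 1:
--             j += 2
--             if l[i] == l[j]:
--                 score += (i + j + 2) * (s[i] + s[j])
--             else:
--                 continue
--     return score
-- ===== SOURCE B (Python) =====
-- def solution(n, s, l):
--     # One pass: per (parity, label) group keep (count, sum i, sum s[i], sum i*s[i]);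
--     # each new index j adds all its pair contributions from earlier same-group indices in O(1).
--     if n <= 2:
--         return 0
--     score = 0
--     acc = {}
--     for j in range(n):
--         sj = s[j]
--         key = (j % 2, l[j])
--         c, a1, a2, a3 = acc.get(key, (0, 0, 0, 0))
--         score += a3 + (j + 2) * a2 + sj * (a1 + c * (j + 2))
--         acc[key] = (c + 1, a1 + j, a2 + sj, a3 + j * sj)
--     return score
-- ===== Notes on version B (the rewrite author's own statement) =====
-- stated objective: faster
-- what changed: Replaces the O(n^2) nested scan over index pairs by a single pass that buckets indices by (parity, label) in a dict and keeps per-bucket running aggregates (count, sum i, sum s[i], sum i*s[i]) so each index adds all its pair contributions in O(1).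
-- intended difference: On n == 3 with l[0] != l[2] (and s[0]+s[2] != 0, so the values actually differ) A's hard-coded shortcut returns 4*(s[0]+s[2]) ignoring the labels, while B returns 0, which is the intended value since every other n only scores pairs with equal labels. — e.g. on solution(3, [1, 0, 2], [0, 1, 1]): A returns 12, B returns 0
-- outside the precondition, e.g. on solution(3, [1, 2, 3], []): A returns 16, B raises IndexError; on solution(4, [0], [7, 8, 9, 10]): A returns 0, B raises IndexError
import Mathlib
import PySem

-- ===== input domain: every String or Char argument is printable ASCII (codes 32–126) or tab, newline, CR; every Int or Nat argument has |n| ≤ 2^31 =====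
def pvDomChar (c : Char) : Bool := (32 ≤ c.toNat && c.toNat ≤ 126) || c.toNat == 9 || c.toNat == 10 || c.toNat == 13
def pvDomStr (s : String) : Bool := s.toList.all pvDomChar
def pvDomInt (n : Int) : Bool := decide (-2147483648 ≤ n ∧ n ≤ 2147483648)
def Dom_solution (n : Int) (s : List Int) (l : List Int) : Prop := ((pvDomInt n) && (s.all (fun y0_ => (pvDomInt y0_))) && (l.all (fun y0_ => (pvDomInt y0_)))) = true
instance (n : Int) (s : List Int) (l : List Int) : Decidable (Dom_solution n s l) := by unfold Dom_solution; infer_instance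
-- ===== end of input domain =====

-- B replaces A's O(n^2) pair scan by one pass with per-(parity,label) running aggregates in a dict;
-- on n == 3 with unequal labels A's shortcut ignores the labels, B intentionally scores 0 (see D_solution).


-- ===== PORT A =====
-- inner 'while j + 2 <= n - 1' loop of A
def solInner (n : Int) (s : List Int) (l : List Int) (i : Int) (j : Int) (score : Int) : Int :=
  if h : j + 2 ≤ n - 1 then
    solInner n s l i (j + 2)
      (if PySem.List.pyGetD l i 0 = PySem.List.pyGetD l (j + 2) 0 then
        score + (i + (j + 2) + 2) * (PySem.List.pyGetD s i 0 + PySem.List.pyGetD s (j + 2) 0)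
      else score)
  else score
termination_by (n - 1 - j).toNat
decreasing_by omega

def solution (n : Int) (s : List Int) (l : List Int) : Int :=
  if n ≤ 2 then 0
  else if n = 3 then (1 + 3) * (PySem.List.pyGetD s 0 0 + PySem.List.pyGetD s 2 0)
  else (PySem.List.pyRange 0 (n - 2) 1).foldl (fun score i => solInner n s l i i score) 0

-- ===== PORT B =====
-- one step of B's loop body: score update from the bucket aggregates, then the bucket update
def bstep (s : List Int) (l : List Int)
    (st : Int × PySem.Dict (Int × Int) (Int × Int × Int × Int)) (j : Int) :
    Int × PySem.Dict (Int × Int) (Int × Int × Int × Int) :=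
  let sj := PySem.List.pyGetD s j 0
  let key := (PySem.Int.mod j 2, PySem.List.pyGetD l j 0)
  let q := st.2.getD key (0, 0, 0, 0)
  (st.1 + (q.2.2.2 + (j + 2) * q.2.2.1 + sj * (q.2.1 + q.1 * (j + 2))),
   st.2.insert key (q.1 + 1, q.2.1 + j, q.2.2.1 + sj, q.2.2.2 + j * sj))

def solution_alt (n : Int) (s : List Int) (l : List Int) : Int :=
  if n ≤ 2 then 0
  else ((PySem.List.pyRange 0 n 1).foldl (bstep s l) (0, PySem.Dict.empty)).1

-- ===== PRECONDITION & SPEC =====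
-- Pre_ excludes inputs where either program raises IndexError (lists shorter than n). It is slightly
-- narrower than A's return set: for n ≥ 3 A can still return when the lists are short, if the n == 3
-- shortcut only needs s[0], s[2], or labels never match so s is never read (see claim cites).
def Pre_solution (n : Int) (s : List Int) (l : List Int) : Prop :=
  n ≤ 2 ∨ (n ≤ (s.length : Int) ∧ n ≤ (l.length : Int))
instance (n : Int) (s : List Int) (l : List Int) : Decidable (Pre_solution n s l) := by
  unfold Pre_solution; infer_instance
def pvWitness_solution : Int × List Int × List Int := (4, [1, 2, 3, 4], [0, 1, 0, 1])

-- On n == 3 with l[0] ≠ l[2] (and s[0] + s[2] ≠ 0, so the values differ) A's hard-coded shortcut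
-- returns 4*(s[0]+s[2]) ignoring the labels, while B returns 0, the intended value: for every other n
-- only pairs with equal labels score.
def D_solution (n : Int) (s : List Int) (l : List Int) : Prop :=
  n = 3 ∧ l.getD 0 0 ≠ l.getD 2 0 ∧ s.getD 0 0 + s.getD 2 0 ≠ 0
instance (n : Int) (s : List Int) (l : List Int) : Decidable (D_solution n s l) := by
  unfold D_solution; infer_instance

def Spec_solution (n : Int) (s : List Int) (l : List Int) (out : Int) : Prop :=
  ¬ D_solution n s l → out = solution_alt n s l
instance (n : Int) (s : List Int) (l : List Int) (out : Int) : Decidable (Spec_solution n s l out) := by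
  unfold Spec_solution; infer_instance

def pvDiffWitness_solution : Int × List Int × List Int := (3, [1, 0, 2], [0, 1, 1])
def pvDiffWitnessOut_solution : Int × Int := (12, 0)

-- ===== CLAIM (what is proved, stated in full; the proofs are below) =====
def Claim_unchanged_solution : Prop := ∀ (n : Int) (s : List Int) (l : List Int), Dom_solution n s l → Pre_solution n s l → Spec_solution n s l (solution n s l)
def Claim_changed_solution : Prop := Dom_solution (pvDiffWitness_solution.1) (pvDiffWitness_solution.2.1) (pvDiffWitness_solution.2.2) ∧ Pre_solution (pvDiffWitness_solution.1) (pvDiffWitness_solution.2.1) (pvDiffWitness_solution.2.2) ∧ D_solution (pvDiffWitness_solution.1) (pvDiffWitness_solution.2.1) (pvDiffWitness_solution.2.2) ∧ solution (pvDiffWitness_solution.1) (pvDiffWitness_solution.2.1) (pvDiffWitness_solution.2.2) = pvDiffWitnessOut_solution.1 ∧ solution_alt (pvDiffWitness_solution.1) (pvDiffWitness_solution.2.1) (pvDiffWitness_solution.2.2) = pvDiffWitnessOut_solution.2 ∧ pvDiffWitnessOut_solution.1 ≠ pvDiffWitnessOut_solution.2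
def Claim_exact_solution : Prop := ∀ (n : Int) (s : List Int) (l : List Int), Dom_solution n s l → Pre_solution n s l → D_solution n s l → solution n s l ≠ solution_alt n s l

-- ===== LEMMAS AND PROOFS =====

-- contribution of the pair (earlier index i, later index k), as both programs score it
def contrib (s : List Int) (l : List Int) (i k : Int) : Int :=
  if PySem.List.pyGetD l i 0 = PySem.List.pyGetD l k 0 then
    (i + k + 2) * (PySem.List.pyGetD s i 0 + PySem.List.pyGetD s k 0)
  else 0

-- total score of all same-parity pairs with later index k
def G (s : List Int) (l : List Int) (k : Nat) : Int :=
  ∑ i ∈ Finset.range k, if (i : Int) % 2 = (k : Int) % 2 then contrib s l (i : Int) (k : Int) else 0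

-- the common value: total score over all same-parity pairs below m
def F (s : List Int) (l : List Int) (m : Nat) : Int := ∑ k ∈ Finset.range m, G s l k

-- what A's inner while loop starting at j adds for outer index i
def Sfrom (m : Nat) (s : List Int) (l : List Int) (i j : Int) : Int :=
  ∑ k ∈ Finset.range m, if j < (k : Int) ∧ (k : Int) % 2 = i % 2 then contrib s l i (k : Int) else 0

-- B's bucket of key (p, v): indices below m with that parity and label
def aggSet (l : List Int) (m : Nat) (p v : Int) : Finset Nat :=
  (Finset.range m).filter (fun i => (i : Int) % 2 = p ∧ PySem.List.pyGetD l (i : Int) 0 = v)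

-- the aggregates B's dict stores for that bucket
def aggVal (s : List Int) (l : List Int) (m : Nat) (p v : Int) : Int × Int × Int × Int :=
  (((aggSet l m p v).card : Int),
   ∑ i ∈ aggSet l m p v, (i : Int),
   ∑ i ∈ aggSet l m p v, PySem.List.pyGetD s (i : Int) 0,
   ∑ i ∈ aggSet l m p v, (i : Int) * PySem.List.pyGetD s (i : Int) 0)

lemma Sfrom_zero (m : Nat) (s l : List Int) (i j : Int) (hpar : j % 2 = i % 2)
    (h : ¬ j + 2 ≤ (m : Int) - 1) : Sfrom m s l i j = 0 := by
  unfold Sfrom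
  apply Finset.sum_eq_zero
  intro k hk
  rw [Finset.mem_range] at hk
  rw [if_neg]
  rintro ⟨h1, h2⟩
  omega

lemma Sfrom_peel (m : Nat) (s l : List Int) (i j : Int) (hj : 0 ≤ j) (hpar : j % 2 = i % 2)
    (h : j + 2 ≤ (m : Int) - 1) : Sfrom m s l i j = contrib s l i (j + 2) + Sfrom m s l i (j + 2) := by
  unfold Sfrom
  have key : ∀ k ∈ Finset.range m,
      (if j < (k : Int) ∧ (k : Int) % 2 = i % 2 then contrib s l i (k : Int) else 0) =
      (if k = (j + 2).toNat then contrib s l i (k : Int) else 0) +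
      (if j + 2 < (k : Int) ∧ (k : Int) % 2 = i % 2 then contrib s l i (k : Int) else 0) := by
    intro k hk
    rw [Finset.mem_range] at hk
    by_cases h1 : k = (j + 2).toNat
    · rw [if_pos h1, if_pos (by omega), if_neg (by omega)]; ring
    · rw [if_neg h1]
      by_cases h2 : j < (k : Int) ∧ (k : Int) % 2 = i % 2
      · rw [if_pos h2, if_pos (by omega)]; ring
      · rw [if_neg h2, if_neg (by omega)]; ring
  rw [Finset.sum_congr rfl key, Finset.sum_add_distrib]
  congr 1
  rw [Finset.sum_ite_eq' (Finset.range m) ((j + 2).toNat) (fun k => contrib s l i (k : Int)),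
    if_pos (by rw [Finset.mem_range]; omega)]
  congr 1
  omega

lemma solInner_eq (m : Nat) (s l : List Int) (i : Int) :
    ∀ (fuel : Nat) (j score : Int), ((m : Int) - 1 - j).toNat ≤ fuel → 0 ≤ j → j % 2 = i % 2 →
      solInner (m : Int) s l i j score = score + Sfrom m s l i j := by
  intro fuel
  induction fuel with
  | zero =>
    intro j score hf hj hpar
    rw [solInner, dif_neg (by omega), Sfrom_zero m s l i j hpar (by omega)]; ring
  | succ t ih =>
    intro j score hf hj hpar
    by_cases h : j + 2 ≤ (m : Int) - 1
    · rw [solInner, dif_pos h, ih (j + 2) _ (by omega) (by omega) (by omega),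
        Sfrom_peel m s l i j hj hpar h]
      unfold contrib
      split_ifs <;> ring
    · rw [solInner, dif_neg h, Sfrom_zero m s l i j hpar h]; ring


lemma sum_Sfrom_eq_F (m : Nat) (s l : List Int) :
    ∑ i ∈ Finset.range (m - 2), Sfrom m s l (i : Int) (i : Int) = F s l m := by
  have ext : ∑ i ∈ Finset.range (m - 2), Sfrom m s l (i : Int) (i : Int)
      = ∑ i ∈ Finset.range m, Sfrom m s l (i : Int) (i : Int) := by
    have hsub : Finset.range (m - 2) ⊆ Finset.range m := by intro x hx; rw [Finset.mem_range] at hx ⊢; omega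
    apply Finset.sum_subset hsub
    intro i hi hni
    rw [Finset.mem_range] at hi hni
    apply Finset.sum_eq_zero
    intro k hk
    rw [Finset.mem_range] at hk
    rw [if_neg]; rintro ⟨h1, h2⟩
    omega
  rw [ext]
  unfold Sfrom F
  rw [Finset.sum_comm]
  apply Finset.sum_congr rfl
  intro k hk
  rw [Finset.mem_range] at hk
  unfold G
  have hsub2 : Finset.range k ⊆ Finset.range m := by intro x hx; rw [Finset.mem_range] at hx ⊢; omega
  have hz : ∀ i ∈ Finset.range m, i ∉ Finset.range k →
      (if (i : Int) < (k : Int) ∧ (k : Int) % 2 = (i : Int) % 2 then contrib s l (i : Int) (k : Int) else 0) = 0 := by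
    intro i hi hni
    rw [Finset.mem_range] at hi hni
    rw [if_neg]; rintro ⟨h1, h2⟩
    omega
  rw [(Finset.sum_subset hsub2 hz).symm]
  apply Finset.sum_congr rfl
  intro i hi
  rw [Finset.mem_range] at hi
  by_cases hp : (i : Int) % 2 = (k : Int) % 2
  · rw [if_pos ⟨by exact_mod_cast hi, by omega⟩, if_pos hp]
  · rw [if_neg (by omega), if_neg hp]

lemma A_eq_F (n : Int) (s l : List Int) (h4 : 4 ≤ n) :
    solution n s l = F s l n.toNat := by
  obtain ⟨m, hm⟩ : ∃ m : Nat, n = (m : Int) := ⟨n.toNat, by omega⟩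
  subst hm
  unfold solution
  rw [if_neg (by omega), if_neg (by omega)]
  have hcong : ∀ (acc x : Int), x ∈ PySem.List.pyRange 0 ((m : Int) - 2) 1 →
      solInner (m : Int) s l x x acc = acc + Sfrom m s l x x := by
    intro acc x hx
    rw [PySem.List.mem_pyRange_one] at hx
    exact solInner_eq m s l x (((m : Int) - 1 - x).toNat) x acc le_rfl hx.1 rfl
  rw [PySem.List.foldl_congr_mem _ _ _ _ hcong]
  rw [PySem.List.foldl_add, PySem.List.pyRange_one, List.map_map]
  have h1 : ((m : Int) - 2 - 0).toNat = m - 2 := by omega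
  rw [h1]
  have h2 : ((List.range (m - 2)).map ((fun i => Sfrom m s l i i) ∘ fun k : Nat => (k : Int))).sum
      = ∑ i ∈ Finset.range (m - 2), Sfrom m s l (i : Int) (i : Int) := rfl
  simp only [zero_add]
  rw [h2, sum_Sfrom_eq_F, Int.toNat_natCast]

lemma agg_expand (S : Finset Nat) (sv : Nat → Int) (c w : Int) :
    ∑ i ∈ S, ((i : Int) + c) * (sv i + w)
      = (∑ i ∈ S, (i : Int) * sv i) + c * (∑ i ∈ S, sv i)
        + w * ((∑ i ∈ S, (i : Int)) + (S.card : Int) * c) := by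
  have h1 : ∀ i ∈ S, ((i : Int) + c) * (sv i + w)
      = (i : Int) * sv i + c * sv i + w * (i : Int) + c * w := by
    intro i _; ring
  rw [Finset.sum_congr rfl h1]
  simp only [Finset.sum_add_distrib, ← Finset.mul_sum, Finset.sum_const, nsmul_eq_mul]
  ring

lemma G_agg (s l : List Int) (t : Nat) :
    G s l t =
      (aggVal s l t ((t : Int) % 2) (PySem.List.pyGetD l (t : Int) 0)).2.2.2
      + ((t : Int) + 2) * (aggVal s l t ((t : Int) % 2) (PySem.List.pyGetD l (t : Int) 0)).2.2.1
      + PySem.List.pyGetD s (t : Int) 0 *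
        ((aggVal s l t ((t : Int) % 2) (PySem.List.pyGetD l (t : Int) 0)).2.1
         + (aggVal s l t ((t : Int) % 2) (PySem.List.pyGetD l (t : Int) 0)).1 * ((t : Int) + 2)) := by
  unfold G aggVal aggSet
  simp only
  have step1 : ∀ i ∈ Finset.range t,
      (if (i : Int) % 2 = (t : Int) % 2 then contrib s l (i : Int) (t : Int) else 0)
      = (if (i : Int) % 2 = (t : Int) % 2 ∧ PySem.List.pyGetD l (i : Int) 0 = PySem.List.pyGetD l (t : Int) 0 then
          ((i : Int) + ((t : Int) + 2)) * (PySem.List.pyGetD s (i : Int) 0 + PySem.List.pyGetD s (t : Int) 0) else 0) := by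
    intro i _
    unfold contrib
    by_cases h1 : (i : Int) % 2 = (t : Int) % 2
    · by_cases h2 : PySem.List.pyGetD l (i : Int) 0 = PySem.List.pyGetD l (t : Int) 0
      · rw [if_pos h1, if_pos h2, if_pos ⟨h1, h2⟩]; ring
      · rw [if_pos h1, if_neg h2, if_neg (by tauto)]
    · rw [if_neg h1, if_neg (by tauto)]
  rw [Finset.sum_congr rfl step1, ← Finset.sum_filter, agg_expand]

lemma aggVal_zero (s l : List Int) (p v : Int) : aggVal s l 0 p v = (0, 0, 0, 0) := by
  simp [aggVal, aggSet]

lemma aggSet_succ (l : List Int) (t : Nat) (p v : Int) :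
    aggSet l (t + 1) p v =
      if (t : Int) % 2 = p ∧ PySem.List.pyGetD l (t : Int) 0 = v then
        insert t (aggSet l t p v)
      else aggSet l t p v := by
  unfold aggSet
  rw [Finset.range_add_one, Finset.filter_insert]

lemma bstep_eq (s l : List Int) (st : Int × PySem.Dict (Int × Int) (Int × Int × Int × Int)) (j : Int) :
    bstep s l st j =
      (st.1 + ((st.2.getD (j % 2, PySem.List.pyGetD l j 0) (0, 0, 0, 0)).2.2.2
        + (j + 2) * (st.2.getD (j % 2, PySem.List.pyGetD l j 0) (0, 0, 0, 0)).2.2.1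
        + PySem.List.pyGetD s j 0 * ((st.2.getD (j % 2, PySem.List.pyGetD l j 0) (0, 0, 0, 0)).2.1
          + (st.2.getD (j % 2, PySem.List.pyGetD l j 0) (0, 0, 0, 0)).1 * (j + 2))),
       st.2.insert (j % 2, PySem.List.pyGetD l j 0)
         ((st.2.getD (j % 2, PySem.List.pyGetD l j 0) (0, 0, 0, 0)).1 + 1,
          (st.2.getD (j % 2, PySem.List.pyGetD l j 0) (0, 0, 0, 0)).2.1 + j,
          (st.2.getD (j % 2, PySem.List.pyGetD l j 0) (0, 0, 0, 0)).2.2.1 + PySem.List.pyGetD s j 0,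
          (st.2.getD (j % 2, PySem.List.pyGetD l j 0) (0, 0, 0, 0)).2.2.2 + j * PySem.List.pyGetD s j 0)) := by
  unfold bstep
  rw [show PySem.Int.mod j 2 = j % 2 from PySem.Int.mod_eq_emod_of_pos (by norm_num)]

lemma B_inv (s l : List Int) (k : Nat) :
    (((PySem.List.pyRange 0 (k : Int) 1).foldl (bstep s l) (0, PySem.Dict.empty)).1 = F s l k) ∧
    (∀ p v, ((PySem.List.pyRange 0 (k : Int) 1).foldl (bstep s l) (0, PySem.Dict.empty)).2.getD (p, v) (0, 0, 0, 0) = aggVal s l k p v) := by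
  induction k with
  | zero =>
    rw [show ((0 : Nat) : Int) = 0 from rfl, PySem.List.pyRange_one_eq_nil le_rfl]
    refine ⟨by simp [F], ?_⟩
    intro p v
    simp [aggVal_zero, PySem.Dict.getD_empty]
  | succ t ih =>
    obtain ⟨ih1, ih2⟩ := ih
    have hsplit : PySem.List.pyRange 0 (((t + 1 : Nat)) : Int) 1
        = PySem.List.pyRange 0 ((t : Nat) : Int) 1 ++ [(t : Int)] := by
      push_cast
      exact PySem.List.pyRange_one_succ_right (by positivity)
    rw [hsplit, List.foldl_append]
    simp only [List.foldl_cons, List.foldl_nil]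
    rw [bstep_eq s l _ (t : Int)]
    rw [ih2 ((t : Int) % 2) (PySem.List.pyGetD l (t : Int) 0)]
    constructor
    · rw [ih1]
      unfold F
      rw [Finset.sum_range_succ, G_agg]
    · intro p v
      rw [PySem.Dict.getD_insert]
      by_cases hkey : (p, v) = ((t : Int) % 2, PySem.List.pyGetD l (t : Int) 0)
      · rw [if_pos hkey]
        rw [Prod.ext_iff] at hkey
        obtain ⟨hp, hv⟩ := hkey
        subst hp; subst hv
        have ht : t ∉ aggSet l t ((t : Int) % 2) (PySem.List.pyGetD l (t : Int) 0) := by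
          unfold aggSet; simp
        unfold aggVal
        rw [aggSet_succ, if_pos ⟨rfl, rfl⟩, Finset.card_insert_of_notMem ht,
          Finset.sum_insert ht, Finset.sum_insert ht, Finset.sum_insert ht]
        simp only [Prod.mk.injEq]
        refine ⟨by push_cast; ring, by ring, by ring, by ring⟩
      · rw [if_neg hkey, ih2 p v]
        have hcond : ¬((t : Int) % 2 = p ∧ PySem.List.pyGetD l (t : Int) 0 = v) := by
          rintro ⟨h1, h2⟩
          exact hkey (by rw [Prod.ext_iff]; exact ⟨h1.symm, h2.symm⟩)
        unfold aggVal
        rw [aggSet_succ, if_neg hcond]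


lemma B_eq_F (n : Int) (s l : List Int) (h3 : 3 ≤ n) :
    solution_alt n s l = F s l n.toNat := by
  obtain ⟨m, hm⟩ : ∃ m : Nat, n = (m : Int) := ⟨n.toNat, by omega⟩
  subst hm
  unfold solution_alt
  rw [if_neg (by omega), Int.toNat_natCast]
  exact (B_inv s l m).1

lemma F_three (s l : List Int) :
    F s l 3 = if l.getD 0 0 = l.getD 2 0 then 4 * (s.getD 0 0 + s.getD 2 0) else 0 := by
  simp [F, G, contrib, Finset.sum_range_succ]

lemma A_three (s l : List Int) :
    solution 3 s l = 4 * (s.getD 0 0 + s.getD 2 0) := by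
  unfold solution
  rw [if_neg (by norm_num), if_pos rfl]
  simp [pysem]

-- ===== VERDICT (by name: the statement is the Claim_ definition above) =====
theorem solution_spec : Claim_unchanged_solution := by
  unfold Claim_unchanged_solution
  intro n s l hdom hpre hnd
  by_cases h2 : n ≤ 2
  · unfold solution solution_alt
    rw [if_pos h2, if_pos h2]
  · by_cases h3 : n = 3
    · subst h3
      rw [A_three, B_eq_F 3 s l (by norm_num), show (3 : Int).toNat = 3 from rfl, F_three]
      unfold D_solution at hnd
      push Not at hnd
      by_cases hl : l.getD 0 0 = l.getD 2 0
      · rw [if_pos hl]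
      · have hs0 : s.getD 0 0 + s.getD 2 0 = 0 := hnd rfl hl
        rw [if_neg hl, hs0]
        ring
    · rw [A_eq_F n s l (by omega), B_eq_F n s l (by omega)]

theorem solution_changed : Claim_changed_solution := by
  unfold Claim_changed_solution; decide

theorem solution_tight : Claim_exact_solution := by
  unfold Claim_exact_solution
  intro n s l hdom hpre hd
  obtain ⟨h3, hne, hsum⟩ := hd
  subst h3
  rw [A_three, B_eq_F 3 s l (by norm_num), show (3 : Int).toNat = 3 from rfl, F_three,
    if_neg hne]
  intro h
  apply hsum
  omega
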